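-- pv_equiv track=rewrite | github.com/TripodsOfHephaestus/Hogben-s-Statistics | bistro.py | bistromaking
-- ===== SOURCE A (Python) =====
-- def bistromaking(topbun2, bistromeats2,lowerbun2, order, bistro2, sqd2):
--     if order >0:
--         bistromeats2+=topbun2
--         lowerbun2+=bistromeats2
--         bistro2=lowerbun2
--         sqd2.append(bistro2)
--
--         return  bistromaking(topbun2+2, bistromeats2,lowerbun2, order-1, bistro2, sqd2)
--     else:
--         return sqd2
-- ===== SOURCE B (Python) =====
-- def bistromaking(topbun2, bistromeats2, lowerbun2, order, bistro2, sqd2):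
--     for _ in range(order):
--         bistromeats2 += topbun2
--         lowerbun2 += bistromeats2
--         sqd2.append(lowerbun2)
--         topbun2 += 2
--     return sqd2
-- ===== Notes on version B (the rewrite author's own statement) =====
-- stated objective: idiomatic
-- what changed: Replaces A's accumulating tail recursion (with the redundant bistro2 pass-through) by a plain iterative for-loop over range(order) mutating local running variables; Pre_ excludes order > 9900, where A's one-frame-per-unit recursion exhausts the recursion limit and raises RecursionError (B returns the same list on the small margin just below the raise point).
import Mathlib
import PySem

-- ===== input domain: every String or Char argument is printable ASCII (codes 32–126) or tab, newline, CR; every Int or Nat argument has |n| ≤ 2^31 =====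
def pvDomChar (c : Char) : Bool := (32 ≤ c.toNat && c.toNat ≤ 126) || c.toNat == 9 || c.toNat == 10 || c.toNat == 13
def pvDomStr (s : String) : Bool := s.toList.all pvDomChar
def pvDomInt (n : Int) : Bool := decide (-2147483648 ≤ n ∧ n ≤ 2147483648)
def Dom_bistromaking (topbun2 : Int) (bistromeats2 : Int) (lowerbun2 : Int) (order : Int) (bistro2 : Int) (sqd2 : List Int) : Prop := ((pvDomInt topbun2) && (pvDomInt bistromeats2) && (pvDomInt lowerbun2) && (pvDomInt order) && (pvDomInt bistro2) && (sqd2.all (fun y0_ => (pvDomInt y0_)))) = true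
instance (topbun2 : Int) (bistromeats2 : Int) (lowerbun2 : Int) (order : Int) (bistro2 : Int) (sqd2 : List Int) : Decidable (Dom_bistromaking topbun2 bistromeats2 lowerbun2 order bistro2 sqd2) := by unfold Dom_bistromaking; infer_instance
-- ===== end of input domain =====

-- ===== PORT A =====
-- B rewrites A's accumulating tail recursion as an iterative for-loop over range(order); same return value.
-- Note: the Python A (and B) mutates sqd2 in place; the equivalence proved here is about the return value.
def bistromaking (topbun2 : Int) (bistromeats2 : Int) (lowerbun2 : Int) (order : Int) (bistro2 : Int) (sqd2 : List Int) : List Int :=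
  if 0 < order then
    let bistromeats2' := bistromeats2 + topbun2
    let lowerbun2' := lowerbun2 + bistromeats2'
    let bistro2' := lowerbun2'
    let sqd2' := sqd2 ++ [bistro2']
    bistromaking (topbun2 + 2) bistromeats2' lowerbun2' (order - 1) bistro2' sqd2'
  else sqd2
termination_by order.toNat
decreasing_by omega

-- ===== PORT B =====
def bistroStep (s : Int × Int × Int × List Int) : Int × Int × Int × List Int :=
  let bm := s.2.1 + s.1
  let lb := s.2.2.1 + bm
  (s.1 + 2, bm, lb, s.2.2.2 ++ [lb])

def bistromaking_alt (topbun2 : Int) (bistromeats2 : Int) (lowerbun2 : Int) (order : Int) (bistro2 : Int) (sqd2 : List Int) : List Int :=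
  ((PySem.List.pyRange 0 order 1).foldl (fun s _ => bistroStep s)
    (topbun2, bistromeats2, lowerbun2, sqd2)).2.2.2

-- ===== PRECONDITION & SPEC =====
-- Pre_ excludes order > 9900: A makes one recursive call per unit of order, so for such orders it
-- exhausts the interpreter's recursion budget and raises RecursionError; the exact raise point
-- depends on the caller's current stack depth, so the bound carries a small safety margin (order in
-- the margin just below the raise point is excluded although A still returns there; B returns the
-- same list on that margin).
def Pre_bistromaking (topbun2 : Int) (bistromeats2 : Int) (lowerbun2 : Int) (order : Int) (bistro2 : Int) (sqd2 : List Int) : Prop := order ≤ 9900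
instance (topbun2 : Int) (bistromeats2 : Int) (lowerbun2 : Int) (order : Int) (bistro2 : Int) (sqd2 : List Int) : Decidable (Pre_bistromaking topbun2 bistromeats2 lowerbun2 order bistro2 sqd2) := by unfold Pre_bistromaking; infer_instance
def pvWitness_bistromaking : Int × Int × Int × Int × Int × List Int := (1, 0, 0, 3, 0, [5])

def Spec_bistromaking (topbun2 : Int) (bistromeats2 : Int) (lowerbun2 : Int) (order : Int) (bistro2 : Int) (sqd2 : List Int) (out : List Int) : Prop := out = bistromaking_alt topbun2 bistromeats2 lowerbun2 order bistro2 sqd2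
instance (topbun2 : Int) (bistromeats2 : Int) (lowerbun2 : Int) (order : Int) (bistro2 : Int) (sqd2 : List Int) (out : List Int) : Decidable (Spec_bistromaking topbun2 bistromeats2 lowerbun2 order bistro2 sqd2 out) := by unfold Spec_bistromaking; infer_instance

-- ===== CLAIM (what is proved, stated in full; the proofs are below) =====
def Claim_equal_bistromaking : Prop := ∀ (topbun2 : Int) (bistromeats2 : Int) (lowerbun2 : Int) (order : Int) (bistro2 : Int) (sqd2 : List Int), Dom_bistromaking topbun2 bistromeats2 lowerbun2 order bistro2 sqd2 → Pre_bistromaking topbun2 bistromeats2 lowerbun2 order bistro2 sqd2 → Spec_bistromaking topbun2 bistromeats2 lowerbun2 order bistro2 sqd2 (bistromaking topbun2 bistromeats2 lowerbun2 order bistro2 sqd2)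

-- ===== LEMMAS AND PROOFS =====
lemma foldl_ignore {α β : Type} (g : α → α) (s : α) (xs : List β) :
    xs.foldl (fun s _ => g s) s = g^[xs.length] s := by
  induction xs generalizing s with
  | nil => rfl
  | cons x xs ih => simp [List.foldl, ih, Function.iterate_succ_apply]

lemma bistromaking_iterate (n : Nat) :
    ∀ (t b l bi : Int) (q : List Int),
      bistromaking t b l (n : Int) bi q = (bistroStep^[n] (t, b, l, q)).2.2.2 := by
  induction n with
  | zero => intro t b l bi q; rw [bistromaking]; simp
  | succ n ih =>
    intro t b l bi q
    rw [bistromaking]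
    have h : (0 : Int) < ((n + 1 : Nat) : Int) := by positivity
    simp only [h, if_pos]
    have : ((n + 1 : Nat) : Int) - 1 = (n : Int) := by push_cast; ring
    rw [this, ih, Function.iterate_succ_apply]
    rfl

lemma bistromaking_nonpos (o : Int) (h : ¬ 0 < o) (t b l bi : Int) (q : List Int) :
    bistromaking t b l o bi q = q := by
  rw [bistromaking]; simp [h]

-- ===== VERDICT (by name: the statement is the Claim_ definition above) =====
theorem bistromaking_spec : Claim_equal_bistromaking := by
  intro t b l o bi q _ _
  unfold Spec_bistromaking bistromaking_alt
  by_cases h : 0 < o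
  · have hn : o = ((o.toNat : Nat) : Int) := by omega
    rw [hn, bistromaking_iterate, foldl_ignore, PySem.List.length_pyRange_one]
    have h0 : ((o.toNat : Int) - 0).toNat = o.toNat := by omega
    rw [h0]
  · rw [bistromaking_nonpos o h]
    rw [PySem.List.pyRange_one_eq_nil (by omega)]
    rfl
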